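-- pv_equiv track=rewrite | github.com/TiBillet/tiheureuse | Pi/rfid_reader.py | _clean_uid_bytes
-- ===== SOURCE A (Python) =====
-- from typing import Optional, List
--
-- def _bytes_to_hex(bseq: List[int]) -> str:
--     """Transforme une séquence d'octets (0..255) en HEX uppercase sans séparateur."""
--     return ''.join(f'{b:02X}' for b in bseq)
--
-- def _clean_uid_bytes(uid_bytes: List[int]) -> str:
--     """
--     Enlève les BCC (chaque 5ᵉ octet d'un bloc 4 UID + 1 BCC) et les cascade tags (0x88).
--     Conserve l'ordre des blocs (CL1 → CL2 → CL3).
--     Renvoie une chaîne HEX uppercase.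
--     """
--     if not uid_bytes:
--         return ''
--
--     data = list(uid_bytes)  # copie
--     cleaned: List[int] = []
--
--     # cas classique : blocs de 5 (4 UID + 1 BCC)
--     if len(data) >= 5 and (len(data) % 5 == 0 or len(data) == 5):
--         for i in range(0, len(data), 5):
--             block = data[i:i + 5]
--             if len(block) >= 4:
--                 cleaned.extend(block[:4])  # jette BCC
--             else:
--                 cleaned.extend(block)
--     else:
--         # fallback : si exactement 5 octets supposés (4 UID + BCC), on jette le dernier
--         cleaned = data[:-1] if len(data) == 5 else data
--
--     # retire tous les cascade tags
--     cleaned = [b for b in cleaned if b != 0x88]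
--     return _bytes_to_hex(cleaned)
-- ===== SOURCE B (Python) =====
-- def _clean_uid_bytes(uid_bytes):
--     cleaned = list(uid_bytes)
--     if cleaned and len(cleaned) % 5 == 0:
--         del cleaned[4::5]  # drop every BCC byte in one extended-slice deletion
--     return ''.join(map('{:02X}'.format, filter((0x88).__ne__, cleaned)))
-- ===== Notes on version B (the rewrite author's own statement) =====
-- stated objective: idiomatic
-- what changed: B has no explicit loop at all: it drops every BCC byte with a single extended-slice deletion (del cleaned[4::5]) and hex-encodes with map/filter over the result, replacing A's range(0,n,5) block-slicing loop, its dead fallback branch and its separate list-comprehension filter pass.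
import Mathlib
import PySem

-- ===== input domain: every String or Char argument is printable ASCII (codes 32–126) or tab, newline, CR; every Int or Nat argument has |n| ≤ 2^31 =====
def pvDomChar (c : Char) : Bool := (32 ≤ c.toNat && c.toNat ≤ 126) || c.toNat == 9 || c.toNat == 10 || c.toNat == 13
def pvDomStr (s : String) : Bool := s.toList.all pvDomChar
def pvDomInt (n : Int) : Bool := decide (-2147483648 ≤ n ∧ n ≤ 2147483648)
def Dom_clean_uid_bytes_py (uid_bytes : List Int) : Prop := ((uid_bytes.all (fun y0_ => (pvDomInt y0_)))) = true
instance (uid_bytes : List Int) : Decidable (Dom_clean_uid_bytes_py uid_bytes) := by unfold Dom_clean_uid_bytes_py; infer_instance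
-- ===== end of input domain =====

-- B removes the BCC bytes with a single extended-slice deletion (del cleaned[4::5]) and hex-encodes
-- with map/filter, instead of A's range-step-5 block-slicing loop plus a separate filter pass (objective: idiomatic).

-- shared helper: Python's '{:02X}'.format(b) / f'{b:02X}' (both A and B format bytes this way)
def hexDigitChar (n : Nat) : Char := if n < 10 then Char.ofNat (48 + n) else Char.ofNat (55 + n)

def toHexNat (n : Nat) : List Char :=
  if h : n < 16 then [hexDigitChar n]
  else toHexNat (n / 16) ++ [hexDigitChar (n % 16)]
  termination_by n
  decreasing_by exact Nat.div_lt_self (by omega) (by omega)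

def hex02 (b : Int) : String :=
  if b < 0 then String.mk ('-' :: toHexNat b.natAbs)
  else
    let ds := toHexNat b.toNat
    String.mk (if ds.length < 2 then '0' :: ds else ds)

-- ===== PORT A =====
def bytes_to_hex (bseq : List Int) : String := String.join (bseq.map hex02)

def clean_uid_bytes_py (uid_bytes : List Int) : String :=
  if uid_bytes = [] then "" else
  let data := uid_bytes
  let cleaned : List Int :=
    if 5 ≤ data.length ∧ (data.length % 5 = 0 ∨ data.length = 5) then
      (PySem.List.pyRange 0 (data.length : Int) 5).foldl (fun cleaned i =>
        let block := PySem.List.slice data (some i) (some (i + 5))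
        if 4 ≤ block.length then cleaned ++ block.take 4 else cleaned ++ block) []
    else
      if data.length = 5 then PySem.List.slice data none (some (-1)) else data
  let cleaned2 := cleaned.filter (fun b => b != 136)
  bytes_to_hex cleaned2

-- ===== PORT B =====
-- exact hand port of Python's `del cleaned[4::5]`: the extended slice [4::5] selects exactly the
-- indices i with i % 5 = 4 (4, 9, 14, …), and deletion keeps all other elements in order
def delBCC (xs : List Int) : List Int :=
  ((PySem.List.enumerate xs).filter (fun p => p.1 % 5 != 4)).map Prod.snd

def clean_uid_bytes_py_alt (uid_bytes : List Int) : String :=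
  let cleaned := uid_bytes
  let cleaned := if cleaned ≠ [] ∧ cleaned.length % 5 = 0 then delBCC cleaned else cleaned
  String.join (((cleaned.filter (fun b => b != 136)).map hex02))

-- ===== PRECONDITION & SPEC =====
def Spec_clean_uid_bytes_py (uid_bytes : List Int) (out : String) : Prop := out = clean_uid_bytes_py_alt uid_bytes
instance (uid_bytes : List Int) (out : String) : Decidable (Spec_clean_uid_bytes_py uid_bytes out) := by unfold Spec_clean_uid_bytes_py; infer_instance

-- ===== CLAIM (what is proved, stated in full; the proofs are below) =====
def Claim_equal_clean_uid_bytes_py : Prop := ∀ (uid_bytes : List Int), Dom_clean_uid_bytes_py uid_bytes → Spec_clean_uid_bytes_py uid_bytes (clean_uid_bytes_py uid_bytes)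

-- ===== LEMMAS AND PROOFS =====

-- what both programs keep on a multiple-of-5 list: the first 4 of every 5-byte block
def keep5 : List Int → List Int
  | a :: b :: c :: d :: _ :: r => a :: b :: c :: d :: keep5 r
  | l => l

theorem del_slice_strip (n : Nat) (xs : List Int) (s : Int)
    (hlen : xs.length = 5 * n) (hs : s % 5 = 0) :
    ((PySem.List.enumerate xs s).filter (fun p => p.1 % 5 != 4)).map Prod.snd
      = keep5 xs := by
  induction n generalizing xs s with
  | zero =>
      have : xs = [] := List.eq_nil_of_length_eq_zero (by omega)
      subst this; simp [PySem.List.enumerate_nil, keep5]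
  | succ n ih =>
      match xs, hlen with
      | a :: b :: c :: d :: e :: r, hlen =>
        have hr : r.length = 5 * n := by simp at hlen; omega
        have h5 : (s + 5) % 5 = 0 := by omega
        simp only [PySem.List.enumerate_cons, List.filter_cons, keep5]
        have e0 : s % 5 != 4 := by simp; omega
        have e1 : (s + 1) % 5 != 4 := by simp; omega
        have e2 : (s + 1 + 1) % 5 != 4 := by simp; omega
        have e3 : (s + 1 + 1 + 1) % 5 != 4 := by simp; omega
        have e4 : ((s + 1 + 1 + 1 + 1) % 5 != 4) = false := by simp; omega
        rw [show s + 1 + 1 + 1 + 1 + 1 = s + 5 by ring] at *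
        simp [e0, e1, e2, e3, e4, ih r (s + 5) hr h5]

theorem flatMap_blocks (n : Nat) (data : List Int) (hlen : data.length = 5 * n) :
    (List.range n).flatMap (fun k => (data.drop (5 * k)).take 4) = keep5 data := by
  induction n generalizing data with
  | zero =>
      have : data = [] := List.eq_nil_of_length_eq_zero (by omega)
      subst this; simp [keep5]
  | succ n ih =>
      match data, hlen with
      | a :: b :: c :: d :: e :: r, hlen =>
        have hr : r.length = 5 * n := by simp at hlen; omega
        rw [List.range_succ_eq_map, List.flatMap_cons, List.flatMap_map]
        have hdrop : ∀ k ∈ List.range n,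
            ((a :: b :: c :: d :: e :: r).drop (5 * (k + 1))).take 4
            = (r.drop (5 * k)).take 4 := by
          intro k _
          simp [List.drop]
        rw [List.flatMap_congr hdrop, ih r hr]
        rfl

-- A's block loop produces keep5
theorem a_loop_eq_keep5 (n : Nat) (data : List Int) (hlen : data.length = 5 * n) :
    (PySem.List.pyRange 0 (data.length : Int) 5).foldl (fun cleaned i =>
        let block := PySem.List.slice data (some i) (some (i + 5))
        if 4 ≤ block.length then cleaned ++ block.take 4 else cleaned ++ block) []
      = keep5 data := by
  have hbody : (fun (cleaned : List Int) (i : Int) =>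
        let block := PySem.List.slice data (some i) (some (i + 5))
        if 4 ≤ block.length then cleaned ++ block.take 4 else cleaned ++ block)
      = fun cleaned i => cleaned ++
        (let block := PySem.List.slice data (some i) (some (i + 5))
         if 4 ≤ block.length then block.take 4 else block) := by
    funext cleaned i; simp only []; split <;> rfl
  rw [hbody, PySem.List.foldl_append_eq_flatMap]
  have hc : (if (0 : Int) < (data.length : Int)
        then (((data.length : Int) - 0 + 5 - 1) / 5).toNat else 0) = n := by
    rw [hlen]
    by_cases hn : n = 0
    · subst hn; norm_num
    · rw [if_pos (by push_cast; omega)]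
      push_cast
      omega
  have hrange : PySem.List.pyRange 0 (data.length : Int) 5
      = (List.range n).map (fun k : Nat => (0 : Int) + 5 * (k : Int)) := by
    rw [PySem.List.pyRange_of_pos 0 (data.length : Int) (by norm_num), hc]
  rw [hrange, List.flatMap_map]
  simp only [List.nil_append]
  rw [← flatMap_blocks n data hlen]
  apply List.flatMap_congr
  intro k hk
  have hk' : k < n := List.mem_range.mp hk
  have hblock : PySem.List.slice data (some ((0 : Int) + 5 * k)) (some ((0 : Int) + 5 * k + 5))
      = (data.drop (5 * k)).take 5 := by
    rw [show ((0 : Int) + 5 * (k : Int) + 5) = ((5 * k : Nat) : Int) + ((5 : Nat) : Int) by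
          push_cast; ring,
        show ((0 : Int) + 5 * (k : Int)) = ((5 * k : Nat) : Int) by push_cast; ring,
        PySem.List.slice_natCast_add]
  simp only [hblock]
  have hblen : ((data.drop (5 * k)).take 5).length = 5 := by
    rw [List.length_take, List.length_drop, hlen]; omega
  rw [if_pos (by omega)]
  simp [List.take_take]

-- ===== VERDICT (by name: the statement is the Claim_ definition above) =====
theorem clean_uid_bytes_py_spec : Claim_equal_clean_uid_bytes_py := by
  intro uid_bytes _
  unfold Spec_clean_uid_bytes_py clean_uid_bytes_py clean_uid_bytes_py_alt bytes_to_hex delBCC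
  by_cases hnil : uid_bytes = []
  · simp [hnil, String.join]
  · simp only [if_neg hnil]
    by_cases hstrip : 5 ≤ uid_bytes.length ∧ uid_bytes.length % 5 = 0
    · obtain ⟨h5, hmod⟩ := hstrip
      rw [if_pos (⟨h5, Or.inl hmod⟩ :
            5 ≤ uid_bytes.length ∧ (uid_bytes.length % 5 = 0 ∨ uid_bytes.length = 5)),
          if_pos ⟨hnil, hmod⟩]
      obtain ⟨n, hn⟩ : ∃ n, uid_bytes.length = 5 * n := ⟨uid_bytes.length / 5, by omega⟩
      rw [a_loop_eq_keep5 n uid_bytes hn, del_slice_strip n uid_bytes 0 hn (by norm_num)]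
    · have hcond : ¬ (5 ≤ uid_bytes.length ∧ (uid_bytes.length % 5 = 0 ∨ uid_bytes.length = 5)) := by
        intro ⟨h5, hor⟩
        exact hstrip ⟨h5, by rcases hor with h | h; exact h; omega⟩
      have hne5 : uid_bytes.length ≠ 5 := fun h => hcond ⟨by omega, Or.inr h⟩
      have hlen1 : 1 ≤ uid_bytes.length := by
        cases uid_bytes with
        | nil => exact absurd rfl hnil
        | cons a t => simp
      have hbcond : ¬ (uid_bytes ≠ [] ∧ uid_bytes.length % 5 = 0) := by
        intro ⟨_, hmod⟩
        exact hstrip ⟨by omega, hmod⟩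
      rw [if_neg hcond, if_neg hne5, if_neg hbcond]
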